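-- pv_equiv track=rewrite | github.com/caromedellin/tweets-sounds | celltransforms.py | transposes
-- ===== SOURCE A (Python) =====
-- def transposes(first_notes, intervals):
--     new_cells = []
--     for first_note in first_notes:
--             new_pits = [first_note]
--             for interval in intervals:
--                 new_pits.append(interval + new_pits[-1])
--             new_cells.append(new_pits)
--     return new_cells
-- ===== SOURCE B (Python) =====
-- def transposes(first_notes, intervals):
--     prefixes = [0]
--     for interval in intervals:
--         prefixes.append(prefixes[-1] + interval)
--     return [[first_note + p for p in prefixes] for first_note in first_notes]
-- ===== Notes on version B (the rewrite author's own statement) =====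
-- stated objective: alternative
-- what changed: Builds the cumulative interval prefix-sum table once in a separate pass, then each row is produced by adding a constant offset to that shared table, instead of re-accumulating the running sum inside the outer loop for every starting note.
import Mathlib
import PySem

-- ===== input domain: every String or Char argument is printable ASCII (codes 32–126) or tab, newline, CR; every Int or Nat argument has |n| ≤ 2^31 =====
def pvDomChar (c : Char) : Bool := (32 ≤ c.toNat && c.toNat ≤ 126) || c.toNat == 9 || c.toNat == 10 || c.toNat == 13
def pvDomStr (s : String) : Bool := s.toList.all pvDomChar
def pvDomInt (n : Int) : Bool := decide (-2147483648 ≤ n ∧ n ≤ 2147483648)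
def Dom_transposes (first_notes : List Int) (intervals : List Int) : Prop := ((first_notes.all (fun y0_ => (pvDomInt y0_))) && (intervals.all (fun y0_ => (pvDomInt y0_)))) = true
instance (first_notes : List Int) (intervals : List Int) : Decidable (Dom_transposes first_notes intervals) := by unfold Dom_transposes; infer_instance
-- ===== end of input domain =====

-- B builds the interval prefix-sum table once in a separate pass; each row is then a constant offset added to that shared table (alternative decomposition; no speed claim).

-- ===== PORT A =====
-- inner loop: new_pits.append(interval + new_pits[-1]); new_pits is always nonempty, so [-1] is getLast!
def transposes (first_notes : List Int) (intervals : List Int) : List (List Int) :=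
  first_notes.foldl
    (fun new_cells first_note =>
      let new_pits :=
        intervals.foldl (fun new_pits interval => new_pits ++ [interval + new_pits.getLast!]) [first_note]
      new_cells ++ [new_pits])
    []

-- ===== PORT B =====
def transposes_alt (first_notes : List Int) (intervals : List Int) : List (List Int) :=
  let prefixes := intervals.foldl (fun prefixes interval => prefixes ++ [prefixes.getLast! + interval]) [(0 : Int)]
  first_notes.map (fun first_note => prefixes.map (fun p => first_note + p))

-- ===== PRECONDITION & SPEC =====
def Spec_transposes (first_notes : List Int) (intervals : List Int) (out : List (List Int)) : Prop := out = transposes_alt first_notes intervals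
instance (first_notes : List Int) (intervals : List Int) (out : List (List Int)) : Decidable (Spec_transposes first_notes intervals out) := by unfold Spec_transposes; infer_instance

-- ===== CLAIM (what is proved, stated in full; the proofs are below) =====
def Claim_equal_transposes : Prop := ∀ (first_notes : List Int) (intervals : List Int), Dom_transposes first_notes intervals → Spec_transposes first_notes intervals (transposes first_notes intervals)

-- ===== LEMMAS AND PROOFS =====

theorem pv_getLast!_map_add (f : Int) (ps : List Int) (h : ps ≠ []) :
    (ps.map (fun p => f + p)).getLast! = f + ps.getLast! := by
  induction ps with
  | nil => exact absurd rfl h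
  | cons a l ih =>
    cases l with
    | nil => simp [List.getLast!]
    | cons b m =>
      have hm : (b :: m) ≠ [] := by simp
      have h1 : ((a :: b :: m).map (fun p => f + p)).getLast! = ((b :: m).map (fun p => f + p)).getLast! := by
        simp [List.getLast!]
      have h2 : (a :: b :: m).getLast! = (b :: m).getLast! := by
        simp [List.getLast!]
      rw [h1, h2]; exact ih hm

theorem pv_row_eq (ints : List Int) (f : Int) (ps : List Int) (h : ps ≠ []) :
    ints.foldl (fun new_pits interval => new_pits ++ [interval + new_pits.getLast!])
      (ps.map (fun p => f + p))
    = (ints.foldl (fun prefixes interval => prefixes ++ [prefixes.getLast! + interval]) ps).map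
        (fun p => f + p) := by
  induction ints generalizing ps with
  | nil => rfl
  | cons i t ih =>
    simp only [List.foldl_cons]
    rw [pv_getLast!_map_add f ps h]
    have : (ps.map (fun p => f + p)) ++ [i + (f + ps.getLast!)]
        = (ps ++ [ps.getLast! + i]).map (fun p => f + p) := by
      simp; ring
    rw [this]
    exact ih _ (by simp)

theorem pv_foldl_append_map (fns : List Int) (g : Int → List Int) (acc : List (List Int)) :
    fns.foldl (fun cells f => cells ++ [g f]) acc = acc ++ fns.map g := by
  induction fns generalizing acc with
  | nil => simp
  | cons a t ih => simp [ih]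

-- ===== VERDICT (by name: the statement is the Claim_ definition above) =====
theorem transposes_spec : Claim_equal_transposes := by
  intro first_notes intervals _
  unfold Spec_transposes transposes transposes_alt
  rw [pv_foldl_append_map]
  simp only [List.nil_append]
  apply List.map_congr_left
  intro f _
  have := pv_row_eq intervals f [(0 : Int)] (by simp)
  simpa using this
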